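-- pv_equiv track=rewrite | github.com/rithvikredrouthu/Wordle_Solver | engine.py | evaluate_guess_char
-- ===== SOURCE A (Python) =====
-- def evaluate_guess_char(guess, answer, pos):
--     if answer[pos]==guess[pos]:
--         return "Y"
--     unmatched_answer_chars = 0
--     unmatched_guess_chars = 0
--     this_guess_num = 0
--     for i in range(5):
--         if answer[i]==guess[pos]:
--             if answer[i]!=guess[i]:
--                 unmatched_answer_chars += 1
--         if guess[i]==guess[pos]:
--             if answer[i]!=guess[i]:
--                 unmatched_guess_chars += 1
--                 if i<pos:
--                     this_guess_num += 1
--     if this_guess_num<unmatched_answer_chars: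
--         return "M"
--     return "N"
-- ===== SOURCE B (Python) =====
-- def evaluate_guess_char(guess, answer, pos):
--     # two-pass scorer: collect the pool of unmatched answer letters, then
--     # consume the pool left-to-right for earlier unmatched occurrences of
--     # the queried guess letter; 'M' iff a copy is still available
--     if answer[pos] == guess[pos]:
--         return "Y"
--     pool = [answer[i] for i in range(5) if answer[i] != guess[i]]
--     c = guess[pos]
--     for i in range(5):
--         if i < pos and guess[i] == c and answer[i] != guess[i] and c in pool:
--             pool.remove(c)
--     return "M" if c in pool else "N"
-- ===== Notes on version B (the rewrite author's own statement) =====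
-- stated objective: alternative
-- what changed: Replaces A's single loop of three running counters compared at the end with the classic two-pass Wordle consumption scheme: build the pool (list) of unmatched answer letters, consume one copy per earlier unmatched occurrence of the queried guess letter, and answer M iff a copy is still in the pool.
import Mathlib
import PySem

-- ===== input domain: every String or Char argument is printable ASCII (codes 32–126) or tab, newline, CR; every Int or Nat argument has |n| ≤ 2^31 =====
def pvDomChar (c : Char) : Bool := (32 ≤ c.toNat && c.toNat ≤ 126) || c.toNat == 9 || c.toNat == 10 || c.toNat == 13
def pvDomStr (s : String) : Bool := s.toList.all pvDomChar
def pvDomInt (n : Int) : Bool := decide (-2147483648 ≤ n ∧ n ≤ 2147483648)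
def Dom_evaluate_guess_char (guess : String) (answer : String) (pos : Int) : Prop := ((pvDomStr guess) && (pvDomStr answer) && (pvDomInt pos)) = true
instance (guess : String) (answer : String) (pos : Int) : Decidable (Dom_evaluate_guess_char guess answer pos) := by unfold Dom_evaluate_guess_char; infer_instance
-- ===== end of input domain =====

-- B replaces A's three-counter counting loop by the two-pass Wordle consumption scheme: collect the pool of
-- unmatched answer letters, consume it left-to-right for earlier unmatched occurrences of the queried letter,
-- and answer M iff a copy is still available; a genuinely different decomposition of the same cost.

-- ===== PORT A =====
-- loop body of A's 'for i in range(5)': state (unmatched_answer_chars, unmatched_guess_chars, this_guess_num)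
def pvAStep (a g : List Char) (gp : Char) (pos : Int) (s : Int × Int × Int) (i : Int) : Int × Int × Int :=
  let ai := PySem.List.pyGetD a i ' '
  let gi := PySem.List.pyGetD g i ' '
  let s1 := if ai == gp then (if ai != gi then (s.1 + 1, s.2.1, s.2.2) else s) else s
  if gi == gp then
    (if ai != gi then (s1.1, s1.2.1 + 1, if i < pos then s1.2.2 + 1 else s1.2.2) else s1)
  else s1

def evaluate_guess_char (guess : String) (answer : String) (pos : Int) : String :=
  let g := guess.toList
  let a := answer.toList
  if PySem.List.pyGetD a pos ' ' == PySem.List.pyGetD g pos ' ' then "Y"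
  else
    let s := (PySem.List.pyRange 0 5 1).foldl (pvAStep a g (PySem.List.pyGetD g pos ' ') pos) (0, 0, 0)
    if s.2.2 < s.1 then "M" else "N"

-- ===== PORT B =====
-- body of Source B's comprehension: '[answer[i] for i in range(5) if answer[i] != guess[i]]'
def pvPoolStep (a g : List Char) (acc : List Char) (i : Int) : List Char :=
  if PySem.List.pyGetD a i ' ' != PySem.List.pyGetD g i ' ' then acc ++ [PySem.List.pyGetD a i ' '] else acc

-- body of Source B's consumption loop ('pool.remove(c)' = remove first occurrence, guarded by 'c in pool')
def pvConsume (a g : List Char) (c : Char) (pos : Int) (pool : List Char) (i : Int) : List Char :=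
  if i < pos ∧ (PySem.List.pyGetD g i ' ' == c) = true ∧
      (PySem.List.pyGetD a i ' ' != PySem.List.pyGetD g i ' ') = true ∧ pool.contains c = true then
    (PySem.List.remove? pool c).getD pool
  else pool

def evaluate_guess_char_alt (guess : String) (answer : String) (pos : Int) : String :=
  let g := guess.toList
  let a := answer.toList
  if PySem.List.pyGetD a pos ' ' == PySem.List.pyGetD g pos ' ' then "Y"
  else
    let c := PySem.List.pyGetD g pos ' '
    let pool := (PySem.List.pyRange 0 5 1).foldl (pvConsume a g c pos)
      ((PySem.List.pyRange 0 5 1).foldl (pvPoolStep a g) [])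
    if pool.contains c then "M" else "N"

-- ===== PRECONDITION & SPEC =====
-- Pre_ is exactly the set of inputs on which the Python A returns normally: pos must be a valid (possibly
-- negative) index into both words, and — unless the two characters at pos already match, where A returns "Y"
-- immediately — both words must have at least 5 characters for A's 'for i in range(5)' loop; everywhere
-- outside Pre_ the Python A (and B alike) raises IndexError.
def Pre_evaluate_guess_char (guess : String) (answer : String) (pos : Int) : Prop :=
  (-(guess.toList.length : Int) ≤ pos ∧ pos < guess.toList.length) ∧
  (-(answer.toList.length : Int) ≤ pos ∧ pos < answer.toList.length) ∧
  (PySem.List.pyGetD answer.toList pos ' ' = PySem.List.pyGetD guess.toList pos ' ' ∨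
    (5 ≤ guess.toList.length ∧ 5 ≤ answer.toList.length))
instance (guess : String) (answer : String) (pos : Int) : Decidable (Pre_evaluate_guess_char guess answer pos) := by unfold Pre_evaluate_guess_char; infer_instance

def pvWitness_evaluate_guess_char : String × String × Int := ("crane", "slate", 2)

def Spec_evaluate_guess_char (guess : String) (answer : String) (pos : Int) (out : String) : Prop := out = evaluate_guess_char_alt guess answer pos
instance (guess : String) (answer : String) (pos : Int) (out : String) : Decidable (Spec_evaluate_guess_char guess answer pos out) := by unfold Spec_evaluate_guess_char; infer_instance

-- ===== CLAIM (what is proved, stated in full; the proofs are below) =====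
def Claim_equal_evaluate_guess_char : Prop := ∀ (guess : String) (answer : String) (pos : Int), Dom_evaluate_guess_char guess answer pos → Pre_evaluate_guess_char guess answer pos → Spec_evaluate_guess_char guess answer pos (evaluate_guess_char guess answer pos)

-- ===== LEMMAS AND PROOFS =====

-- countP over the python range [0, m)
def pvCnt (p : Int → Bool) (m : Int) : Nat := (PySem.List.pyRange 0 m 1).countP p

lemma pvCnt_zero (p : Int → Bool) : pvCnt p 0 = 0 := by
  unfold pvCnt
  rw [PySem.List.pyRange_one_eq_nil le_rfl]
  rfl

lemma pvCnt_succ (p : Int → Bool) (n : Nat) :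
    pvCnt p ((n : Int) + 1) = pvCnt p n + (if p n then 1 else 0) := by
  unfold pvCnt
  rw [PySem.List.pyRange_one_succ_right (by positivity)]
  simp only [List.countP_append, List.countP_cons, List.countP_nil]
  split_ifs <;> simp_all

-- characterization of A's loop
lemma pvAStep_foldl (a g : List Char) (gp : Char) (pos : Int) (n : Nat) :
    (PySem.List.pyRange 0 (n : Int) 1).foldl (pvAStep a g gp pos) (0, 0, 0) =
      ((pvCnt (fun i => PySem.List.pyGetD a i ' ' == gp && PySem.List.pyGetD a i ' ' != PySem.List.pyGetD g i ' ') n : Int),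
       (pvCnt (fun i => PySem.List.pyGetD g i ' ' == gp && PySem.List.pyGetD a i ' ' != PySem.List.pyGetD g i ' ') n : Int),
       (pvCnt (fun i => PySem.List.pyGetD g i ' ' == gp && (PySem.List.pyGetD a i ' ' != PySem.List.pyGetD g i ' ' && decide (i < pos))) n : Int)) := by
  induction n with
  | zero => simp [PySem.List.pyRange_one_eq_nil, pvCnt]
  | succ n ih =>
    have hc : ((n + 1 : Nat) : Int) = (n : Int) + 1 := by push_cast; ring
    rw [hc, PySem.List.pyRange_one_succ_right (by positivity), List.foldl_append, ih]
    simp only [List.foldl_cons, List.foldl_nil]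
    rw [pvCnt_succ, pvCnt_succ, pvCnt_succ]
    simp only [pvAStep]
    split_ifs <;> simp_all <;> push_cast <;> omega

-- B's pool of unmatched answer letters holds each letter as often as it is unmatched in the answer
lemma pvPool_count (a g : List Char) (c : Char) (n : Nat) :
    List.count c ((PySem.List.pyRange 0 (n : Int) 1).foldl (pvPoolStep a g) [])
      = pvCnt (fun i => (PySem.List.pyGetD a i ' ' != PySem.List.pyGetD g i ' ') && (PySem.List.pyGetD a i ' ' == c)) n := by
  induction n with
  | zero =>
    simp only [Nat.cast_zero]
    rw [PySem.List.pyRange_one_eq_nil le_rfl]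
    simp [pvCnt_zero]
  | succ n ih =>
    have hc : ((n + 1 : Nat) : Int) = (n : Int) + 1 := by push_cast; ring
    rw [hc, PySem.List.pyRange_one_succ_right (by positivity), List.foldl_append, pvCnt_succ]
    simp only [List.foldl_cons, List.foldl_nil, pvPoolStep]
    by_cases h : (PySem.List.pyGetD a (n : Int) ' ' != PySem.List.pyGetD g (n : Int) ' ') = true
    · have h' : ¬ (a[n]?.getD ' ' = g[n]?.getD ' ') := by simpa using h
      rw [if_pos h, List.count_append, ih]
      by_cases h2 : (PySem.List.pyGetD a (n : Int) ' ' == c) = true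
      · have h2' : a[n]?.getD ' ' = c := by simpa using h2
        have h3 : ¬ c = g[n]?.getD ' ' := h2' ▸ h'
        simp [h2', h3]
      · have h2' : ¬ (a[n]?.getD ' ' = c) := by simpa using h2
        simp [h', h2']
    · have h' : a[n]?.getD ' ' = g[n]?.getD ' ' := by simpa using h
      rw [if_neg h, ih]
      simp [h']

-- B's consumption loop: the pool keeps max(0, available - consumed) copies of the queried letter
lemma pvConsume_count (a g : List Char) (c : Char) (pos : Int) (pool0 : List Char) (n : Nat) :
    List.count c ((PySem.List.pyRange 0 (n : Int) 1).foldl (pvConsume a g c pos) pool0)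
      = List.count c pool0
        - pvCnt (fun i => decide (i < pos) && (PySem.List.pyGetD g i ' ' == c) && (PySem.List.pyGetD a i ' ' != PySem.List.pyGetD g i ' ')) n := by
  induction n with
  | zero =>
    simp only [Nat.cast_zero]
    rw [PySem.List.pyRange_one_eq_nil le_rfl, pvCnt_zero]
    simp
  | succ n ih =>
    have hc : ((n + 1 : Nat) : Int) = (n : Int) + 1 := by push_cast; ring
    rw [hc, PySem.List.pyRange_one_succ_right (by positivity), List.foldl_append, pvCnt_succ]
    simp only [List.foldl_cons, List.foldl_nil, pvConsume]
    by_cases hcond : (n : Int) < pos ∧ (PySem.List.pyGetD g (n : Int) ' ' == c) = true ∧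
        (PySem.List.pyGetD a (n : Int) ' ' != PySem.List.pyGetD g (n : Int) ' ') = true ∧
        (List.foldl (pvConsume a g c pos) pool0 (PySem.List.pyRange 0 (n : Int) 1)).contains c = true
    · obtain ⟨h1, h2, h3, h4⟩ := hcond
      rw [if_pos ⟨h1, h2, h3, h4⟩]
      have hmem : c ∈ List.foldl (pvConsume a g c pos) pool0 (PySem.List.pyRange 0 (n : Int) 1) := by
        simpa using h4
      have hcountpos := List.count_pos_iff.mpr hmem
      rw [PySem.List.remove?_eq_some_erase _ c hmem, Option.getD_some, List.count_erase_self]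
      rw [ih] at hcountpos ⊢
      have hq : (decide ((n : Int) < pos) && (PySem.List.pyGetD g (n : Int) ' ' == c) && (PySem.List.pyGetD a (n : Int) ' ' != PySem.List.pyGetD g (n : Int) ' ')) = true := by
        simp [h1]
        exact ⟨by simpa using h2, by simpa using h3⟩
      simp only [hq, if_true]
      omega
    · rw [if_neg hcond]
      by_cases hq : (decide ((n : Int) < pos) && (PySem.List.pyGetD g (n : Int) ' ' == c) && (PySem.List.pyGetD a (n : Int) ' ' != PySem.List.pyGetD g (n : Int) ' ')) = true
      · have hq' := hq
        simp only [Bool.and_eq_true, decide_eq_true_eq] at hq'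
        obtain ⟨⟨h1, h2⟩, h3⟩ := hq'
        have hcont : ¬ (List.foldl (pvConsume a g c pos) pool0 (PySem.List.pyRange 0 (n : Int) 1)).contains c = true :=
          fun hcnt => hcond ⟨h1, h2, h3, hcnt⟩
        have hzero : List.count c (List.foldl (pvConsume a g c pos) pool0 (PySem.List.pyRange 0 (n : Int) 1)) = 0 :=
          List.count_eq_zero.mpr (by simpa using hcont)
        rw [ih] at hzero
        rw [ih]
        simp only [hq, if_true]
        omega
      · rw [ih]
        rw [if_neg hq]
        simp

-- ===== VERDICT (by name: the statement is the Claim_ definition above) =====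
theorem evaluate_guess_char_spec : Claim_equal_evaluate_guess_char := by
  intro guess answer pos hdom hpre
  obtain ⟨hgr_, har_, hcase⟩ := hpre
  unfold Spec_evaluate_guess_char evaluate_guess_char evaluate_guess_char_alt
  dsimp only
  by_cases hgr : (PySem.List.pyGetD answer.toList pos ' ' == PySem.List.pyGetD guess.toList pos ' ') = true
  · rw [if_pos hgr, if_pos hgr]
  · have hlen : 5 ≤ guess.toList.length ∧ 5 ≤ answer.toList.length := by
      rcases hcase with h | h
      · exact absurd (by simp [h]) hgr
      · exact h
    rw [if_neg hgr, if_neg hgr]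
    have hA := pvAStep_foldl answer.toList guess.toList (PySem.List.pyGetD guess.toList pos ' ') pos 5
    simp only [Nat.cast_ofNat] at hA
    rw [hA]
    dsimp only
    have hP := pvPool_count answer.toList guess.toList (PySem.List.pyGetD guess.toList pos ' ') 5
    have hC := pvConsume_count answer.toList guess.toList (PySem.List.pyGetD guess.toList pos ' ') pos
      ((PySem.List.pyRange 0 5 1).foldl (pvPoolStep answer.toList guess.toList) []) 5
    simp only [Nat.cast_ofNat] at hP hC
    rw [hP] at hC
    -- align A's two count predicates with B's
    have hU : pvCnt (fun i => PySem.List.pyGetD answer.toList i ' ' == PySem.List.pyGetD guess.toList pos ' ' && PySem.List.pyGetD answer.toList i ' ' != PySem.List.pyGetD guess.toList i ' ') 5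
        = pvCnt (fun i => (PySem.List.pyGetD answer.toList i ' ' != PySem.List.pyGetD guess.toList i ' ') && (PySem.List.pyGetD answer.toList i ' ' == PySem.List.pyGetD guess.toList pos ' ')) 5 := by
      unfold pvCnt
      apply List.countP_congr
      intro x _
      cases h1 : (PySem.List.pyGetD answer.toList x ' ' == PySem.List.pyGetD guess.toList pos ' ') <;>
        cases h2 : (PySem.List.pyGetD answer.toList x ' ' == PySem.List.pyGetD guess.toList x ' ') <;>
          simp [bne, h2]
    have hT : pvCnt (fun i => PySem.List.pyGetD guess.toList i ' ' == PySem.List.pyGetD guess.toList pos ' ' && (PySem.List.pyGetD answer.toList i ' ' != PySem.List.pyGetD guess.toList i ' ' && decide (i < pos))) 5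
        = pvCnt (fun i => decide (i < pos) && (PySem.List.pyGetD guess.toList i ' ' == PySem.List.pyGetD guess.toList pos ' ') && (PySem.List.pyGetD answer.toList i ' ' != PySem.List.pyGetD guess.toList i ' ')) 5 := by
      unfold pvCnt
      apply List.countP_congr
      intro x _
      cases h1 : (PySem.List.pyGetD guess.toList x ' ' == PySem.List.pyGetD guess.toList pos ' ') <;>
        cases h2 : (PySem.List.pyGetD answer.toList x ' ' == PySem.List.pyGetD guess.toList x ' ') <;>
          cases h3 : decide (x < pos) <;> simp [bne, h2]
    by_cases hcnt : ((PySem.List.pyRange 0 5 1).foldl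
        (pvConsume answer.toList guess.toList (PySem.List.pyGetD guess.toList pos ' ') pos)
        ((PySem.List.pyRange 0 5 1).foldl (pvPoolStep answer.toList guess.toList) [])).contains
          (PySem.List.pyGetD guess.toList pos ' ') = true
    · rw [if_pos hcnt]
      have hpos : 0 < List.count (PySem.List.pyGetD guess.toList pos ' ')
          ((PySem.List.pyRange 0 5 1).foldl
            (pvConsume answer.toList guess.toList (PySem.List.pyGetD guess.toList pos ' ') pos)
            ((PySem.List.pyRange 0 5 1).foldl (pvPoolStep answer.toList guess.toList) [])) :=
        List.count_pos_iff.mpr (by simpa using hcnt)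
      rw [hC] at hpos
      rw [if_pos (by rw [hU, hT]; omega)]
    · rw [if_neg hcnt]
      have hzero : List.count (PySem.List.pyGetD guess.toList pos ' ')
          ((PySem.List.pyRange 0 5 1).foldl
            (pvConsume answer.toList guess.toList (PySem.List.pyGetD guess.toList pos ' ') pos)
            ((PySem.List.pyRange 0 5 1).foldl (pvPoolStep answer.toList guess.toList) [])) = 0 :=
        List.count_eq_zero.mpr (by simpa using hcnt)
      rw [hC] at hzero
      rw [if_neg (by rw [hU, hT]; omega)]
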